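-- pv_equiv track=rewrite | github.com/yashchoudharygit/TCS-NQT-Coding | Accenture/14.vowel/code.py | remove_inner_vowels
-- ===== SOURCE A (Python) =====
-- def remove_inner_vowels(s):
--     vowels = "aeiouAEIOU"
--     modified_str = ""
--
--     for i in range(len(s)):
--         if s[i] in vowels:
--             if i > 0 and i < len(s) - 1 and s[i-1] not in vowels and s[i+1] not in vowels:
--                 continue
--         modified_str += s[i]
--     return modified_str
-- ===== SOURCE B (Python) =====
-- def remove_inner_vowels(s):
--     # Greedy pattern-matching scan (hand-rolled regex substitution): repeatedly try to
--     # match a three-character window (vowel in the middle, non-vowels at both edges) at the cursor; on a match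
--     # emit the left consonant and jump the cursor past the vowel (the right consonant
--     # stays as the next window's left edge); otherwise emit one char and step by one.
--     V = frozenset("aeiouAEIOU")
--     out = []
--     i = 0
--     n = len(s)
--     while i < n:
--         if i + 2 < n and s[i] not in V and s[i + 1] in V and s[i + 2] not in V:
--             out.append(s[i])
--             i += 2
--         else:
--             out.append(s[i])
--             i += 1
--     return "".join(out)
-- ===== Notes on version B (the rewrite author's own statement) =====
-- stated objective: alternative
-- what changed: Replaces A's per-index loop that tests both neighbours of every character by a greedy variable-stride scan (a hand-rolled regex substitution): at the cursor it tries to match a three-character window whose middle is a vowel and whose two edges are not; on a match it emits the left edge and jumps past the vowel (correct because two removable vowels are never adjacent), otherwise it copies one character.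
import Mathlib
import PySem

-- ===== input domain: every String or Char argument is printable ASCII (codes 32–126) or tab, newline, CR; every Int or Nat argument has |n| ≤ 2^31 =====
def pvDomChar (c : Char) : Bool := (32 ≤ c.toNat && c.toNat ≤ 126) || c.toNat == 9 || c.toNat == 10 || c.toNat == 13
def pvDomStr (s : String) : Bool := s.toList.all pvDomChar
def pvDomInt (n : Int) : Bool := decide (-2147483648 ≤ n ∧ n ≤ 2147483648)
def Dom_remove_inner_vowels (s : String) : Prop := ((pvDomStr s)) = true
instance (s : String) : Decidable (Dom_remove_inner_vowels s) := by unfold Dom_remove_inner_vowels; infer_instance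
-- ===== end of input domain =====

-- B replaces A's per-index neighbour test by a greedy variable-stride scan consuming
-- three-character windows (vowel in the middle, non-vowels at the edges) (a hand-rolled regex substitution); same cost.

-- ===== PORT A =====
-- range(len(s)) loop; s[i], s[i-1], s[i+1] are always in range where read (guards 0<i, i<len-1),
-- so getD with a dummy default is exact.
def remove_inner_vowels (s : String) : String :=
  let vowels := "aeiouAEIOU".toList
  let l := s.toList
  String.ofList ((List.range l.length).foldl (fun acc i =>
    if vowels.contains (l.getD i ' ') then
      if decide (0 < i) && decide (i < l.length - 1)
         && !vowels.contains (l.getD (i - 1) ' ')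
         && !vowels.contains (l.getD (i + 1) ' ') then
        acc
      else acc ++ [l.getD i ' ']
    else acc ++ [l.getD i ' ']) [])

-- ===== PORT B =====
-- Source B's membership test `c in V`
def pvVowel (c : Char) : Bool := "aeiouAEIOU".toList.contains c

-- Source B's while loop over the cursor i, as the recursion on the remaining suffix:
-- a matched window emits its first char and drops two (the right consonant stays as head).
def pvGo : List Char → List Char
  | c1 :: v :: c2 :: rest =>
    if !pvVowel c1 && pvVowel v && !pvVowel c2 then
      c1 :: pvGo (c2 :: rest)
    else
      c1 :: pvGo (v :: c2 :: rest)
  | [c, d] => c :: d :: []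
  | [c] => [c]
  | [] => []

def remove_inner_vowels_alt (s : String) : String :=
  String.ofList (pvGo s.toList)

-- ===== PRECONDITION & SPEC =====
def Spec_remove_inner_vowels (s : String) (out : String) : Prop := out = remove_inner_vowels_alt s
instance (s : String) (out : String) : Decidable (Spec_remove_inner_vowels s out) := by unfold Spec_remove_inner_vowels; infer_instance

-- ===== CLAIM (what is proved, stated in full; the proofs are below) =====
def Claim_equal_remove_inner_vowels : Prop := ∀ (s : String), Dom_remove_inner_vowels s → Spec_remove_inner_vowels s (remove_inner_vowels s)

-- ===== LEMMAS AND PROOFS =====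

-- the neighbour triple at index i (for i < l.length)
def pvTrip (l : List Char) (i : Nat) : Option Char × Char × Option Char :=
  ((if i = 0 then none else some (l.getD (i - 1) ' ')),
   l.getD i ' ',
   (if i + 1 = l.length then none else some (l.getD (i + 1) ' ')))

-- the same triples built structurally, threading the previous character
def pvTrips (p : Option Char) : List Char → List (Option Char × Char × Option Char)
  | [] => []
  | c :: rest => (p, c, rest.head?) :: pvTrips (some c) rest

-- the filter predicate B's scan implements, on a (prev, char, next) triple
def pvPred (t : Option Char × Char × Option Char) : Bool :=
  !(pvVowel t.2.1 && t.1.any (fun x => !pvVowel x) && t.2.2.any (fun x => !pvVowel x))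

-- A's keep/drop decisions as a recursion threading the previous character
def pvBrec (p : Option Char) : List Char → List Char
  | [] => []
  | c :: rest =>
    if pvVowel c && p.any (fun x => !pvVowel x) && rest.head?.any (fun x => !pvVowel x) then
      pvBrec (some c) rest
    else c :: pvBrec (some c) rest

-- the index-built triples as a zip of shifted lists
theorem pvZip_eq (l : List Char) :
    (((none : Option Char) :: l.dropLast.map some).zip (l.zip (l.tail.map some ++ [none])))
      = (List.range l.length).map (pvTrip l) := by
  apply List.ext_getElem
  · simp [List.length_zip, List.length_dropLast, List.length_tail]
    omega
  · intro i h1 h2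
    have hi : i < l.length := by
      simp [List.length_zip, List.length_dropLast, List.length_tail] at h1
      omega
    simp only [List.getElem_zip, List.getElem_map, List.getElem_range, pvTrip]
    refine Prod.ext ?_ (Prod.ext ?_ ?_)
    · cases i with
      | zero => simp
      | succ j =>
        have hj : j < l.dropLast.length := by simp [List.length_dropLast]; omega
        have hj' : j < l.length := by omega
        simp [List.getElem_cons_succ, List.getElem_map, List.getElem_dropLast,
          List.getElem?_eq_getElem hj']
    · simp [List.getElem?_eq_getElem hi]
    · by_cases hlast : i + 1 = l.length
      · have hlen : i = (l.tail.map some).length := by simp [List.length_tail]; omega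
        simp [List.getElem_append_right, hlen]
        omega
      · have hi1 : i < (List.map some l.tail).length := by simp [List.length_tail]; omega
        have hi1' : i + 1 < l.length := by omega
        rw [List.getElem_append_left hi1]
        simp [hlast, List.getElem_tail, List.getElem?_eq_getElem hi1']

-- the zip of shifted lists = the structural triples
theorem pvZipTrips (l : List Char) : ∀ (p : Option Char),
    ((p :: l.dropLast.map some).zip (l.zip (l.tail.map some ++ [none]))) = pvTrips p l := by
  induction l with
  | nil => intro p; simp [pvTrips]
  | cons c rest ih =>
    intro p
    cases rest with
    | nil => simp [pvTrips]
    | cons d rest' =>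
      have h := ih (some c)
      simp only [List.tail_cons] at h
      simp only [pvTrips, List.dropLast_cons₂, List.map_cons, List.tail_cons, List.cons_append,
        List.zip_cons_cons, List.head?_cons]
      rw [h]
      simp [pvTrips]

theorem pvMapTrip_eq_trips (l : List Char) :
    (List.range l.length).map (pvTrip l) = pvTrips none l :=
  (pvZip_eq l).symm.trans (pvZipTrips l none)

-- filtering the triples = pvBrec
theorem pvFilter_eq_brec (l : List Char) : ∀ (p : Option Char),
    ((pvTrips p l).filter pvPred).map (fun t => t.2.1) = pvBrec p l := by
  induction l with
  | nil => intro p; simp [pvTrips, pvBrec]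
  | cons c rest ih =>
    intro p
    have hpred : pvPred (p, c, rest.head?)
        = !(pvVowel c && p.any (fun x => !pvVowel x)
            && rest.head?.any (fun x => !pvVowel x)) := rfl
    cases h : (pvVowel c && p.any (fun x => !pvVowel x)
        && rest.head?.any (fun x => !pvVowel x)) with
    | true =>
      simp only [pvTrips, pvBrec, List.filter_cons, hpred, h, if_pos]
      simp [ih (some c)]
    | false =>
      simp only [pvTrips, pvBrec, List.filter_cons, hpred, h]
      simp [ih (some c)]

-- A's fold = filter/map over the triples
theorem pvMain (l : List Char) :
    (List.range l.length).foldl (fun acc i =>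
      if ("aeiouAEIOU".toList).contains (l.getD i ' ') then
        if decide (0 < i) && decide (i < l.length - 1)
           && !("aeiouAEIOU".toList).contains (l.getD (i - 1) ' ')
           && !("aeiouAEIOU".toList).contains (l.getD (i + 1) ' ') then
          acc
        else acc ++ [l.getD i ' ']
      else acc ++ [l.getD i ' ']) []
    = (((List.range l.length).map (pvTrip l)).filter pvPred).map (fun t => t.2.1) := by
  rw [PySem.List.foldl_congr_mem (List.range l.length) _
    (fun acc i =>
      if (!(("aeiouAEIOU".toList).contains (l.getD i ' ')
          && (decide (0 < i) && decide (i < l.length - 1)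
              && !("aeiouAEIOU".toList).contains (l.getD (i - 1) ' ')
              && !("aeiouAEIOU".toList).contains (l.getD (i + 1) ' ')))) = true
      then acc ++ [l.getD i ' '] else acc) []
    (by
      intro acc i _
      cases hc : ("aeiouAEIOU".toList).contains (l.getD i ' ') <;>
        cases hin : (decide (0 < i) && decide (i < l.length - 1)
            && !("aeiouAEIOU".toList).contains (l.getD (i - 1) ' ')
            && !("aeiouAEIOU".toList).contains (l.getD (i + 1) ' ')) <;>
        simp only [hc, hin] <;> simp)]
  rw [PySem.List.foldl_append_if]
  simp only [List.nil_append]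
  rw [List.filter_map, List.map_map]
  have hfil : (List.range l.length).filter
      (fun i => !(("aeiouAEIOU".toList).contains (l.getD i ' ')
          && (decide (0 < i) && decide (i < l.length - 1)
              && !("aeiouAEIOU".toList).contains (l.getD (i - 1) ' ')
              && !("aeiouAEIOU".toList).contains (l.getD (i + 1) ' '))))
      = (List.range l.length).filter (pvPred ∘ pvTrip l) := by
    apply List.filter_congr
    intro i hi
    have hmem : i < l.length := List.mem_range.mp hi
    by_cases h0 : i = 0 <;> by_cases hlast : i + 1 = l.length
    · simp [pvPred, pvVowel, pvTrip, h0]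
    · simp [pvPred, pvVowel, pvTrip, h0]
    · have h1 : ¬ i < l.length - 1 := by omega
      simp [pvPred, pvVowel, pvTrip, Function.comp, h0, hlast, h1]
    · have h0' : 0 < i := Nat.pos_of_ne_zero h0
      have h1' : i < l.length - 1 := by omega
      simp only [Function.comp, pvPred, pvVowel, pvTrip, if_neg h0, if_neg hlast,
        Option.any_some, decide_eq_true h0', decide_eq_true h1']
      cases ("aeiouAEIOU".toList).contains (l.getD i ' ') <;>
        cases ("aeiouAEIOU".toList).contains (l.getD (i - 1) ' ') <;>
        cases ("aeiouAEIOU".toList).contains (l.getD (i + 1) ' ') <;> rfl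
  rw [hfil]
  congr 1

-- B's greedy scan = pvBrec none
theorem pvGo_eq_brec_aux : ∀ (n : Nat) (l : List Char), l.length ≤ n → pvGo l = pvBrec none l := by
  intro n
  induction n with
  | zero =>
    intro l hl
    have : l = [] := List.eq_nil_of_length_eq_zero (Nat.le_zero.mp hl)
    subst this; rfl
  | succ n ih =>
    intro l hl
    match l with
    | [] => rfl
    | [c] => simp [pvGo, pvBrec]
    | [c, d] => simp [pvGo, pvBrec]
    | c1 :: v :: c2 :: rest =>
      by_cases hm : (!pvVowel c1 && pvVowel v && !pvVowel c2) = true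
      · obtain ⟨⟨hc1, hv⟩, hc2⟩ : (pvVowel c1 = false ∧ pvVowel v = true) ∧ pvVowel c2 = false := by
          simpa using hm
        have hlen : (c2 :: rest).length ≤ n := by simp at hl ⊢; omega
        calc pvGo (c1 :: v :: c2 :: rest)
            = c1 :: pvGo (c2 :: rest) := by simp [pvGo, hm]
          _ = c1 :: pvBrec none (c2 :: rest) := by rw [ih _ hlen]
          _ = pvBrec none (c1 :: v :: c2 :: rest) := by
              simp [pvBrec, hc1, hv, hc2]
      · have hlen : (v :: c2 :: rest).length ≤ n := by simp at hl ⊢; omega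
        have hcond : (pvVowel v && !pvVowel c1 && !pvVowel c2) = false := by
          cases h1 : pvVowel c1 <;> cases h2 : pvVowel v <;> cases h3 : pvVowel c2 <;>
            simp [h1, h2, h3] at hm ⊢
        have hsame : pvBrec (some c1) (v :: c2 :: rest) = pvBrec none (v :: c2 :: rest) := by
          simp [pvBrec, hcond]
        calc pvGo (c1 :: v :: c2 :: rest)
            = c1 :: pvGo (v :: c2 :: rest) := by simp [pvGo, hm]
          _ = c1 :: pvBrec none (v :: c2 :: rest) := by rw [ih _ hlen]
          _ = c1 :: pvBrec (some c1) (v :: c2 :: rest) := by rw [hsame]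
          _ = pvBrec none (c1 :: v :: c2 :: rest) := by
              cases hv : pvVowel v <;> simp [pvBrec, hv]

theorem pvGo_eq_brec (l : List Char) : pvGo l = pvBrec none l :=
  pvGo_eq_brec_aux l.length l (le_refl _)

theorem pvAll (l : List Char) :
    (List.range l.length).foldl (fun acc i =>
      if ("aeiouAEIOU".toList).contains (l.getD i ' ') then
        if decide (0 < i) && decide (i < l.length - 1)
           && !("aeiouAEIOU".toList).contains (l.getD (i - 1) ' ')
           && !("aeiouAEIOU".toList).contains (l.getD (i + 1) ' ') then
          acc
        else acc ++ [l.getD i ' ']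
      else acc ++ [l.getD i ' ']) []
    = pvGo l := by
  rw [pvMain, pvMapTrip_eq_trips, pvFilter_eq_brec, ← pvGo_eq_brec]

-- ===== VERDICT =====
theorem remove_inner_vowels_spec : Claim_equal_remove_inner_vowels := by
  intro s _
  exact congrArg String.ofList (pvAll s.toList)
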